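-- pv_equiv track=rewrite | github.com/pythoandtrojan/PolyTools | OSINT/whois.py | extrair_informacoes_chave
-- ===== SOURCE A (Python) =====
-- def extrair_informacoes_chave(resultado):
--     """Extrai informações importantes do resultado whois"""
--     linhas = resultado.split('\n')
--     informacoes = {}
--
--     campos_chave = [
--         'domain name:', 'registrar:', 'creation date:', 'updated date:',
--         'expiration date:', 'name server:', 'status:', 'registrant:',
--         'admin:', 'tech:', 'owner:', 'country:', 'organization:',
--         'domain:', 'created:', 'changed:', 'registrar:'
--     ]
--
--     for linha in linhas:
--         linha_lower = linha.lower().strip()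
--         for campo in campos_chave:
--             if linha_lower.startswith(campo):
--                 valor = linha.split(':', 1)[1].strip() if ':' in linha else linha
--                 chave = campo.replace(':', '').replace(' ', '_').title()
--                 informacoes[chave] = valor
--                 break
--
--     return informacoes
-- ===== SOURCE B (Python) =====
-- _CAMPOS_CHAVE = [
--     'domain name:', 'registrar:', 'creation date:', 'updated date:',
--     'expiration date:', 'name server:', 'status:', 'registrant:',
--     'admin:', 'tech:', 'owner:', 'country:', 'organization:',
--     'domain:', 'created:', 'changed:', 'registrar:'
-- ]
--
-- # segment-before-colon -> formatted output key, built once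
-- _TABELA = {}
-- for _campo in _CAMPOS_CHAVE:
--     _TABELA[_campo[:-1]] = _campo.replace(':', '').replace(' ', '_').title()
--
--
-- def extrair_informacoes_chave(resultado):
--     """Extrai informações importantes do resultado whois"""
--     informacoes = {}
--     for linha in resultado.split('\n'):
--         if ':' not in linha:
--             continue
--         seg, resto = linha.split(':', 1)
--         chave = _TABELA.get(seg.lower().lstrip())
--         if chave is not None:
--             informacoes[chave] = resto.strip()
--     return informacoes
-- ===== Notes on version B (the rewrite author's own statement) =====
-- stated objective: idiomatic
-- what changed: B precomputes a dict mapping each before-colon segment (campo without its trailing ':') to its formatted output key, then handles each line with one split and one lookup, removing A's inner 17-way startswith scan and the per-campo key formatting.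
import Mathlib
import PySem

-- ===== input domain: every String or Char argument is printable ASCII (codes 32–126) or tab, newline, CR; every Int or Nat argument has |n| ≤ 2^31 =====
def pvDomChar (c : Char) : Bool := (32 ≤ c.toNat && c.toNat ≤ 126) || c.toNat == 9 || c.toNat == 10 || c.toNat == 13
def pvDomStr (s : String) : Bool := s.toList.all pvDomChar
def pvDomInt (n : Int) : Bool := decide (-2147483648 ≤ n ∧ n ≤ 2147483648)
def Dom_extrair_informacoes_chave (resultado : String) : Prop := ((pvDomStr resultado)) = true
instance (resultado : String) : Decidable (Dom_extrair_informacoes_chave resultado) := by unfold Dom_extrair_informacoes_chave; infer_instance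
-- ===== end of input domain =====

-- B replaces A's per-line scan over the 17 'startswith' patterns by a dict built once from the
-- before-colon segment to the formatted key: one split and one lookup per line (idiomatic).

-- ===== PORT A =====
def camposChave : List String :=
  ["domain name:", "registrar:", "creation date:", "updated date:",
   "expiration date:", "name server:", "status:", "registrant:",
   "admin:", "tech:", "owner:", "country:", "organization:",
   "domain:", "created:", "changed:", "registrar:"]

-- str.title(), hand-ported (PySem has no title): a char is uppercased when the previous char is
-- not a letter, lowercased otherwise — exact on the printable-ASCII domain, where the cased
-- characters are exactly the letters.
def pyTitleGo : List Char → Bool → List Char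
  | [], _ => []
  | c :: cs, prevCased =>
      (if prevCased then PySem.Chars.lowerChar c else PySem.Chars.upperChar c) :: pyTitleGo cs (PySem.Chars.isalpha c)

-- campo.replace(':', '').replace(' ', '_').title()
def chaveOf (campo : String) : String :=
  String.ofList (pyTitleGo (PySem.Str.replace (PySem.Str.replace campo ":" "") " " "_").toList false)

-- body of A's `for linha in linhas` loop; the inner for/break over campos_chave is List.find?;
-- linha.split(':', 1)[1] is guarded by `':' in linha`, so the total .getD 1 "" reads the
-- element Python reads.
def stepA (informacoes : PySem.Dict String String) (linha : String) : PySem.Dict String String :=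
  let linha_lower := PySem.Str.strip (PySem.Str.lower linha)
  match camposChave.find? (fun campo => PySem.Str.startswith linha_lower campo) with
  | some campo =>
      let valor :=
        if PySem.Str.isIn ":" linha then
          PySem.Str.strip (((PySem.Str.splitMax? linha ":" 1).getD []).getD 1 "")
        else linha
      informacoes.insert (chaveOf campo) valor
  | none => informacoes

def extrair_informacoes_chave (resultado : String) : List (String × String) :=
  let linhas := (PySem.Str.split? resultado "\n").getD []
  (linhas.foldl stepA PySem.Dict.empty).items

-- ===== PORT B =====
-- _TABELA: campo[:-1] -> campo.replace(':', '').replace(' ', '_').title(), built once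
def tabela : PySem.Dict String String :=
  camposChave.foldl
    (fun t campo => t.insert (PySem.Str.slice campo none (some (-1))) (chaveOf campo))
    PySem.Dict.empty

-- body of B's loop: skip lines without ':', split once, look the lowered+lstripped segment up
def stepB (informacoes : PySem.Dict String String) (linha : String) : PySem.Dict String String :=
  if PySem.Str.isIn ":" linha then
    let parts := (PySem.Str.splitMax? linha ":" 1).getD []
    match tabela.get? (PySem.Str.lstrip (PySem.Str.lower (parts.getD 0 ""))) with
    | some chave => informacoes.insert chave (PySem.Str.strip (parts.getD 1 ""))
    | none => informacoes
  else informacoes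

def extrair_informacoes_chave_alt (resultado : String) : List (String × String) :=
  ((((PySem.Str.split? resultado "\n").getD []).foldl stepB PySem.Dict.empty)).items

-- ===== PRECONDITION & SPEC =====
def Spec_extrair_informacoes_chave (resultado : String) (out : List (String × String)) : Prop := out = extrair_informacoes_chave_alt resultado
instance (resultado : String) (out : List (String × String)) : Decidable (Spec_extrair_informacoes_chave resultado out) := by unfold Spec_extrair_informacoes_chave; infer_instance

-- ===== CLAIM (what is proved, stated in full; the proofs are below) =====
def Claim_equal_extrair_informacoes_chave : Prop := ∀ (resultado : String), Dom_extrair_informacoes_chave resultado → Spec_extrair_informacoes_chave resultado (extrair_informacoes_chave resultado)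

-- ===== LEMMAS AND PROOFS =====

theorem colon_infix_iff (cs : List Char) : ([':'] <:+: cs) ↔ ':' ∈ cs := by
  constructor
  · intro h; exact h.mem (List.mem_singleton_self _)
  · intro h
    obtain ⟨s, t, rfl⟩ := List.append_of_mem h
    exact ⟨s, t, by simp⟩

theorem isIn_colon (linha : String) :
    PySem.Str.isIn ":" linha = decide (':' ∈ linha.toList) := by
  by_cases h : ':' ∈ linha.toList
  · simpa [h] using (PySem.Str.isIn_iff_infix ":" linha).2 (by simpa using (colon_infix_iff _).2 h)
  · simp only [h, decide_false]
    cases hv : PySem.Str.isIn ":" linha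
    · rfl
    · exact absurd ((colon_infix_iff _).1 (by simpa using (PySem.Str.isIn_iff_infix ":" linha).1 hv)) h

theorem lowerChar_colon {c : Char} (h : PySem.Chars.lowerChar c = ':') : c = ':' := by
  unfold PySem.Chars.lowerChar PySem.Chars.isupper at h
  split at h
  · next hu =>
    exfalso
    simp only [Bool.and_eq_true, decide_eq_true_eq] at hu
    have h1 : (65 : Nat) ≤ c.toNat := hu.1
    have h2 : c.toNat ≤ 90 := hu.2
    have hv : (c.toNat + 32).isValidChar := Or.inl (by omega)
    have ht : (Char.ofNat (c.toNat + 32)).toNat = c.toNat + 32 := by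
      rw [Char.toNat_ofNat, if_pos hv]
    have := congrArg Char.toNat h
    rw [ht] at this
    have hc : (':' : Char).toNat = 58 := by decide
    omega
  · exact h

theorem mem_colon_lower (l : List Char) (h : ':' ∈ PySem.Chars.lower l) : ':' ∈ l := by
  unfold PySem.Chars.lower at h
  obtain ⟨c, hc, he⟩ := List.mem_map.1 h
  exact (lowerChar_colon he) ▸ hc

theorem no_colon_lstrip_lower (l : List Char) (h : ':' ∉ l) :
    ':' ∉ PySem.Chars.lstrip (PySem.Chars.lower l) := by
  intro hmem
  exact h (mem_colon_lower l ((List.dropWhile_sublist _).mem hmem))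

-- prefix workhorse: 'key:' is a prefix of 'P:R' iff P = key, when neither key nor P contains ':'
theorem prefix_colon_iff (key : List Char) (hk : ':' ∉ key) (P R : List Char) (hP : ':' ∉ P) :
    (key ++ [':'] <+: P ++ ':' :: R) ↔ P = key := by
  induction key generalizing P with
  | nil =>
    cases P with
    | nil => simp
    | cons c P' =>
      simp only [List.nil_append, List.cons_append, List.cons_prefix_cons]
      constructor
      · rintro ⟨rfl, -⟩; exact absurd List.mem_cons_self hP
      · intro h; exact absurd h (by simp)
  | cons k key' ih =>
    cases P with
    | nil =>
      simp only [List.nil_append, List.cons_append, List.cons_prefix_cons]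
      constructor
      · rintro ⟨rfl, -⟩; exact absurd List.mem_cons_self hk
      · intro h; exact absurd h (by simp)
    | cons c P' =>
      simp only [List.cons_append, List.cons_prefix_cons]
      have hk' : ':' ∉ key' := fun hm => hk (List.mem_cons_of_mem _ hm)
      have hP' : ':' ∉ P' := fun hm => hP (List.mem_cons_of_mem _ hm)
      rw [ih hk' P' hP']
      constructor
      · rintro ⟨rfl, rfl⟩; rfl
      · intro h; injection h with h1 h2; exact ⟨h1.symm, h2⟩

theorem startswith_key (P R key : List Char) (hP : ':' ∉ P) (hk : ':' ∉ key) :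
    PySem.Chars.startswith (P ++ ':' :: R) (key ++ [':']) = decide (P = key) := by
  by_cases h : P = key
  · simp only [h, decide_true]
    exact (PySem.Chars.startswith_iff _ _).2 ((prefix_colon_iff key hk key R hk).2 rfl)
  · simp only [h, decide_false]
    cases hv : PySem.Chars.startswith (P ++ ':' :: R) (key ++ [':'])
    · rfl
    · exact absurd ((prefix_colon_iff key hk P R hP).1 ((PySem.Chars.startswith_iff _ _).1 hv)) h

-- no colon in the line ⇒ no campo matches (every campo contains ':')
theorem no_colon_no_match (cs key : List Char) (hkey : ':' ∈ key) (h : ':' ∉ cs) :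
    PySem.Chars.startswith (PySem.Chars.strip (PySem.Chars.lower cs)) key = false := by
  cases hv : PySem.Chars.startswith (PySem.Chars.strip (PySem.Chars.lower cs)) key
  · rfl
  · exfalso
    have hpre := (PySem.Chars.startswith_iff _ _).1 hv
    have hmem : ':' ∈ PySem.Chars.strip (PySem.Chars.lower cs) := hpre.sublist.mem hkey
    unfold PySem.Chars.strip PySem.Chars.rstrip PySem.Chars.lstrip at hmem
    have h2 : ':' ∈ (List.dropWhile PySem.Chars.isspace (PySem.Chars.lower cs)).reverse :=
      (List.dropWhile_sublist _).mem (by simpa using hmem)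
    exact h (mem_colon_lower cs ((List.dropWhile_sublist _).mem (List.mem_reverse.1 h2)))

theorem dropWhile_isspace_append (A B : List Char) :
    List.dropWhile PySem.Chars.isspace (A ++ ':' :: B) =
      List.dropWhile PySem.Chars.isspace A ++ ':' :: B := by
  have hsp : PySem.Chars.isspace ':' = false := by decide
  rw [List.dropWhile_append]
  split
  · next he =>
    rw [List.isEmpty_iff.1 he, List.nil_append, List.dropWhile_cons_of_neg (by simp [hsp])]
  · rfl

theorem rstrip_colon (X Y : List Char) :
    PySem.Chars.rstrip (X ++ ':' :: Y) = X ++ ':' :: PySem.Chars.rstrip Y := by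
  unfold PySem.Chars.rstrip
  rw [show (X ++ ':' :: Y).reverse = Y.reverse ++ ':' :: X.reverse by simp]
  rw [dropWhile_isspace_append]
  simp

-- strip (lower (pre ++ ':' :: rest)) decomposes around the first colon
theorem strip_lower_split (pre rest : List Char) :
    PySem.Chars.strip (PySem.Chars.lower (pre ++ ':' :: rest)) =
      PySem.Chars.lstrip (PySem.Chars.lower pre) ++ ':' :: PySem.Chars.rstrip (PySem.Chars.lower rest) := by
  have hl : PySem.Chars.lower (pre ++ ':' :: rest) =
      PySem.Chars.lower pre ++ ':' :: PySem.Chars.lower rest := by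
    unfold PySem.Chars.lower
    simp [show PySem.Chars.lowerChar ':' = ':' by decide]
  unfold PySem.Chars.strip PySem.Chars.lstrip
  rw [hl, dropWhile_isspace_append, rstrip_colon]

theorem go_zero (fuel : Nat) (l : List Char) (acc : List (List Char)) :
    PySem.Chars.splitOnMax.go [':'] fuel 0 l [] acc = (l :: acc).reverse := by
  cases fuel <;> cases l <;> simp [PySem.Chars.splitOnMax.go]

theorem go_one (fuel : Nat) : ∀ (cs cur : List Char) (acc : List (List Char)),
    cs.length ≤ fuel → ':' ∈ cs →
    PySem.Chars.splitOnMax.go [':'] fuel 1 cs cur acc =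
      acc.reverse ++ [cur.reverse ++ cs.takeWhile (fun c => c != ':'),
        (cs.dropWhile (fun c => c != ':')).tail] := by
  induction fuel with
  | zero =>
    intro cs cur acc hlen hmem
    have h0 : cs = [] := List.eq_nil_of_length_eq_zero (Nat.le_zero.1 hlen)
    subst h0; cases hmem
  | succ f ih =>
    intro cs cur acc hlen hmem
    cases cs with
    | nil => cases hmem
    | cons c rest =>
      by_cases hc : c = ':'
      · subst hc
        have hpre : [':'].isPrefixOf (':' :: rest) = true := by simp [List.isPrefixOf]
        simp only [PySem.Chars.splitOnMax.go, hpre, if_true, Nat.succ_ne_zero, if_false]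
        rw [show (1 : Nat) - 1 = 0 from rfl, show List.drop [':'].length (':' :: rest) = rest from rfl,
          go_zero]
        simp [List.takeWhile, List.dropWhile]
      · have hpre : [':'].isPrefixOf (c :: rest) = false := by
          simp only [List.isPrefixOf, Bool.and_eq_false_iff, beq_eq_false_iff_ne, ne_eq]
          left; exact fun h => hc h.symm
        have hmem' : ':' ∈ rest := by
          rcases List.mem_cons.1 hmem with h | h
          · exact absurd h.symm hc
          · exact h
        simp only [PySem.Chars.splitOnMax.go, hpre, Bool.false_eq_true, if_false, Nat.succ_ne_zero]
        rw [ih rest (c :: cur) acc (by simpa using Nat.le_of_succ_le_succ hlen) hmem']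
        have hcb : (c != ':') = true := by simp [hc]
        simp [hcb]

theorem splitOnMax_colon (cs : List Char) (h : ':' ∈ cs) :
    PySem.Chars.splitOnMax cs [':'] 1 =
      [cs.takeWhile (fun c => c != ':'), (cs.dropWhile (fun c => c != ':')).tail] := by
  unfold PySem.Chars.splitOnMax
  rw [if_neg (by norm_num)]
  rw [show ((1 : Int)).toNat = 1 from rfl]
  rw [go_one (cs.length + 1) cs [] [] (Nat.le_succ _) h]
  simp

theorem dropWhile_colon (cs : List Char) (h : ':' ∈ cs) :
    cs.dropWhile (fun c => c != ':') = ':' :: (cs.dropWhile (fun c => c != ':')).tail := by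
  induction cs with
  | nil => cases h
  | cons c cs' ih =>
    by_cases hc : c = ':'
    · subst hc; simp [List.dropWhile]
    · have hcb : (c != ':') = true := by simp [hc]
      rw [List.dropWhile_cons, if_pos hcb]
      refine ih ?_
      rcases List.mem_cons.1 h with h' | h'
      · exact absurd h'.symm hc
      · exact h'

theorem find?_congr' {α : Type} (p q : α → Bool) (l : List α) (h : ∀ x ∈ l, p x = q x) :
    l.find? p = l.find? q := by
  induction l with
  | nil => rfl
  | cons a l ih =>
    have ha := h a List.mem_cons_self
    by_cases hp : p a = true
    · rw [List.find?_cons_of_pos hp, List.find?_cons_of_pos (ha ▸ hp)]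
    · have hp' : p a = false := by simpa using hp
      rw [List.find?_cons_of_neg (by simp [hp']), List.find?_cons_of_neg (by simp [← ha, hp']),
        ih (fun x hx => h x (List.mem_cons_of_mem _ hx))]

-- first startswith match over a key-consistent campo list = lookup in the dict its fold builds
theorem gen_lookup (campos : List String) (s : String) (d0 : PySem.Dict String String)
    (hdup : ∀ c1 ∈ campos, ∀ c2 ∈ campos,
      PySem.Str.slice c1 none (some (-1)) = PySem.Str.slice c2 none (some (-1)) → chaveOf c1 = chaveOf c2)
    (hd0 : ∀ c ∈ campos, d0.get? (PySem.Str.slice c none (some (-1))) = none ∨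
      d0.get? (PySem.Str.slice c none (some (-1))) = some (chaveOf c)) :
    (campos.foldl (fun t c => t.insert (PySem.Str.slice c none (some (-1))) (chaveOf c)) d0).get? s =
      match campos.find? (fun c => s == PySem.Str.slice c none (some (-1))) with
      | some c => some (chaveOf c)
      | none => d0.get? s := by
  induction campos generalizing d0 with
  | nil => simp
  | cons c cs ih =>
    have hdup' : ∀ c1 ∈ cs, ∀ c2 ∈ cs, PySem.Str.slice c1 none (some (-1)) = PySem.Str.slice c2 none (some (-1)) → chaveOf c1 = chaveOf c2 :=
      fun c1 h1 c2 h2 => hdup c1 (List.mem_cons_of_mem _ h1) c2 (List.mem_cons_of_mem _ h2)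
    have hd0' : ∀ c' ∈ cs,
        (d0.insert (PySem.Str.slice c none (some (-1))) (chaveOf c)).get? (PySem.Str.slice c' none (some (-1))) = none ∨
        (d0.insert (PySem.Str.slice c none (some (-1))) (chaveOf c)).get? (PySem.Str.slice c' none (some (-1))) = some (chaveOf c') := by
      intro c' hc'
      rw [PySem.Dict.get?_insert]
      by_cases he : PySem.Str.slice c' none (some (-1)) = PySem.Str.slice c none (some (-1))
      · right
        rw [if_pos he, hdup c List.mem_cons_self c' (List.mem_cons_of_mem _ hc') he.symm]
      · rw [if_neg he]
        exact hd0 c' (List.mem_cons_of_mem _ hc')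
    rw [List.foldl_cons, ih _ hdup' hd0']
    by_cases hs : s = PySem.Str.slice c none (some (-1))
    · rw [List.find?_cons_of_pos (by simp [hs])]
      cases hf : cs.find? (fun c' => s == PySem.Str.slice c' none (some (-1))) with
      | some c' =>
        show some (chaveOf c') = some (chaveOf c)
        have hsc' : s = PySem.Str.slice c' none (some (-1)) := by
          simpa using List.find?_some hf
        rw [hdup c' (List.mem_cons_of_mem _ (List.mem_of_find?_eq_some hf)) c List.mem_cons_self
          (by rw [← hsc', ← hs])]
      | none =>
        show (d0.insert (PySem.Str.slice c none (some (-1))) (chaveOf c)).get? s = some (chaveOf c)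
        rw [hs, PySem.Dict.get?_insert_self]
    · rw [List.find?_cons_of_neg (by simp [hs])]
      cases hf : cs.find? (fun c' => s == PySem.Str.slice c' none (some (-1))) with
      | some c' => rfl
      | none =>
        show (d0.insert (PySem.Str.slice c none (some (-1))) (chaveOf c)).get? s = d0.get? s
        rw [PySem.Dict.get?_insert, if_neg hs]

-- every campo ends in ':' and its key campo[:-1] is colon-free (checked on the literal list)
theorem campo_shape : ∀ campo ∈ camposChave,
    campo.toList = (PySem.Str.slice campo none (some (-1))).toList ++ [':'] ∧
    ':' ∉ (PySem.Str.slice campo none (some (-1))).toList := by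
  decide

theorem campos_dup_consistent : ∀ c1 ∈ camposChave, ∀ c2 ∈ camposChave,
    PySem.Str.slice c1 none (some (-1)) = PySem.Str.slice c2 none (some (-1)) → chaveOf c1 = chaveOf c2 := by
  decide

theorem campo_has_colon : ∀ campo ∈ camposChave, ':' ∈ campo.toList := by decide

theorem ofList_eq_iff (l : List Char) (t : String) : String.ofList l = t ↔ l = t.toList := by
  constructor
  · intro h; rw [← h, String.toList_ofList]
  · intro h; rw [h, String.ofList_toList]

-- the per-line steps agree
theorem step_eq (d : PySem.Dict String String) (linha : String) : stepA d linha = stepB d linha := by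
  by_cases hc : ':' ∈ linha.toList
  · -- a colon in the line: decompose it around the first colon
    have hsplit : linha.toList =
        linha.toList.takeWhile (fun c => c != ':') ++ ':' :: (linha.toList.dropWhile (fun c => c != ':')).tail := by
      conv_lhs => rw [← List.takeWhile_append_dropWhile (p := fun c => c != ':') (l := linha.toList)]
      conv_lhs => rw [dropWhile_colon _ hc]
    set pre := linha.toList.takeWhile (fun c => c != ':') with hpre
    set suf := (linha.toList.dropWhile (fun c => c != ':')).tail with hsuf
    have hparts : PySem.Str.splitMax? linha ":" 1 = some [String.ofList pre, String.ofList suf] := by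
      unfold PySem.Str.splitMax? PySem.Chars.splitMax?
      rw [if_neg (by decide)]
      rw [show (":" : String).toList = [':'] from rfl, splitOnMax_colon _ hc]
      rfl
    have hprenc : ':' ∉ pre := by
      intro hm
      have := List.mem_takeWhile_imp hm
      simp at this
    have hP : ':' ∉ PySem.Chars.lstrip (PySem.Chars.lower pre) := no_colon_lstrip_lower pre hprenc
    have hlow : (PySem.Str.strip (PySem.Str.lower linha)).toList =
        PySem.Chars.lstrip (PySem.Chars.lower pre) ++ ':' :: PySem.Chars.rstrip (PySem.Chars.lower suf) := by
      unfold PySem.Str.strip PySem.Str.lower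
      rw [String.toList_ofList, String.toList_ofList]
      conv_lhs => rw [hsplit]
      exact strip_lower_split pre suf
    have hpred : ∀ campo ∈ camposChave,
        PySem.Str.startswith (PySem.Str.strip (PySem.Str.lower linha)) campo =
        (String.ofList (PySem.Chars.lstrip (PySem.Chars.lower pre)) == PySem.Str.slice campo none (some (-1))) := by
      intro campo hcampo
      obtain ⟨hshape, hkeync⟩ := campo_shape campo hcampo
      unfold PySem.Str.startswith
      rw [hlow, hshape, startswith_key _ _ _ hP hkeync]
      rw [show (String.ofList (PySem.Chars.lstrip (PySem.Chars.lower pre)) == PySem.Str.slice campo none (some (-1))) =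
        decide (String.ofList (PySem.Chars.lstrip (PySem.Chars.lower pre)) = PySem.Str.slice campo none (some (-1))) from rfl]
      exact decide_eq_decide.mpr (ofList_eq_iff _ _).symm
    unfold stepA stepB
    rw [isIn_colon]
    simp only [hc, decide_true, if_true, hparts, Option.getD_some]
    simp only [List.getD, List.getElem?_cons_zero, List.getElem?_cons_succ, Option.getD_some]
    have hkey : PySem.Str.lstrip (PySem.Str.lower (String.ofList pre)) =
        String.ofList (PySem.Chars.lstrip (PySem.Chars.lower pre)) := by
      unfold PySem.Str.lstrip PySem.Str.lower
      rw [String.toList_ofList, String.toList_ofList]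
    rw [hkey]
    rw [find?_congr' _ _ _ hpred]
    have hlk := gen_lookup camposChave (String.ofList (PySem.Chars.lstrip (PySem.Chars.lower pre)))
      PySem.Dict.empty campos_dup_consistent (fun c _ => Or.inl rfl)
    rw [show tabela = camposChave.foldl (fun t c => t.insert (PySem.Str.slice c none (some (-1))) (chaveOf c)) PySem.Dict.empty from rfl]
    rw [hlk]
    cases hf : camposChave.find?
        (fun campo => String.ofList (PySem.Chars.lstrip (PySem.Chars.lower pre)) == PySem.Str.slice campo none (some (-1))) with
    | some campo => rfl
    | none => rfl
  · -- no colon: A finds no campo, B skips the line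
    unfold stepA stepB
    rw [isIn_colon]
    simp only [hc, decide_false, Bool.false_eq_true, if_false]
    rw [List.find?_eq_none.2 ?_]
    intro campo hcampo
    show ¬ PySem.Str.startswith _ _ = true
    unfold PySem.Str.startswith PySem.Str.strip PySem.Str.lower
    rw [String.toList_ofList, String.toList_ofList]
    rw [no_colon_no_match linha.toList campo.toList (campo_has_colon campo hcampo) hc]
    simp

-- ===== VERDICT (by name: the statement is the Claim_ definition above) =====
theorem extrair_informacoes_chave_spec : Claim_equal_extrair_informacoes_chave := by
  intro resultado _
  unfold Spec_extrair_informacoes_chave extrair_informacoes_chave extrair_informacoes_chave_alt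
  rw [show stepA = stepB from funext fun d => funext fun linha => step_eq d linha]
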